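-- pv_equiv track=rewrite | github.com/shenfanjie5-bit/project-ult-subsystem-holdings | scripts/proof_real_queue_submit_path.py | _private_wire_field_leaks
-- ===== SOURCE A (Python) =====
-- from collections.abc import Mapping, Sequence
-- from typing import Any
--
-- PRIVATE_WIRE_FIELDS = frozenset(
--     {
--         "payload_type",
--         "submitted_by",
--         "submitted_at",
--         "ingest_seq",
--         "layer_b_receipt_id",
--     }
-- )
--
-- def _private_wire_field_leaks(payloads: Sequence[Mapping[str, Any]]) -> list[str]:
--     return sorted(
--         {
--             field
--             for payload in payloads
--             for field in PRIVATE_WIRE_FIELDS.intersection(payload)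
--         }
--     )
-- ===== SOURCE B (Python) =====
-- PRIVATE_WIRE_FIELDS = frozenset(
--     {
--         "payload_type",
--         "submitted_by",
--         "submitted_at",
--         "ingest_seq",
--         "layer_b_receipt_id",
--     }
-- )
--
-- def _private_wire_field_leaks(payloads):
--     # Field-major: walk the fixed field set in sorted order, keep a field if any payload carries it.
--     return [f for f in sorted(PRIVATE_WIRE_FIELDS) if any(f in p for p in payloads)]
-- ===== Notes on version B (the rewrite author's own statement) =====
-- stated objective: alternative
-- what changed: Field-major instead of payload-major: B iterates the fixed field set in sorted order and keeps each field present in some payload, instead of unioning per-payload intersections into a set and sorting it.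
import Mathlib
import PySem

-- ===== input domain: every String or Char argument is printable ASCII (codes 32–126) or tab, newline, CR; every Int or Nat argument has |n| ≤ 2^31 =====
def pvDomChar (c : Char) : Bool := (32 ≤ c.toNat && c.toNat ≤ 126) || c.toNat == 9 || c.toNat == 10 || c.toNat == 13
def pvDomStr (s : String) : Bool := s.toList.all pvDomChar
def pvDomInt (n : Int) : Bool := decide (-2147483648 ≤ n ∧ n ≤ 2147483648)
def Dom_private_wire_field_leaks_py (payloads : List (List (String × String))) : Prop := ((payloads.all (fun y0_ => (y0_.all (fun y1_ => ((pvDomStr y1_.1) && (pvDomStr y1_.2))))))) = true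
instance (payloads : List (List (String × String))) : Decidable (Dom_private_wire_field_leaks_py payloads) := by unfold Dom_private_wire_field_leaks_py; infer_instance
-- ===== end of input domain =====

-- B is field-major: it walks the fixed field set in sorted order and keeps each field present in
-- some payload, instead of unioning per-payload intersections into a set and sorting (objective: alternative).

-- the module constant PRIVATE_WIRE_FIELDS (a frozenset; consumed only order-insensitively)
def pvPrivateWireFields : List String :=
  ["payload_type", "submitted_by", "submitted_at", "ingest_seq", "layer_b_receipt_id"]

-- ===== PORT A =====
-- sorted({field for payload in payloads for field in PRIVATE_WIRE_FIELDS.intersection(payload)})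
def private_wire_field_leaks_py (payloads : List (List (String × String))) : List String :=
  PySem.List.sorted
    (payloads.foldl
      (fun acc p =>
        PySem.Set.update acc (PySem.Set.inter pvPrivateWireFields (p.map (fun kv => kv.1))))
      PySem.Set.empty)
    (fun x => x) false

-- ===== PORT B =====
-- [f for f in sorted(PRIVATE_WIRE_FIELDS) if any(f in p for p in payloads)]
def private_wire_field_leaks_py_alt (payloads : List (List (String × String))) : List String :=
  (PySem.List.sorted pvPrivateWireFields (fun x => x) false).filter
    (fun f => payloads.any (fun p => p.any (fun kv => kv.1 == f)))

-- ===== PRECONDITION & SPEC =====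
def Spec_private_wire_field_leaks_py (payloads : List (List (String × String))) (out : List String) : Prop := out = private_wire_field_leaks_py_alt payloads
instance (payloads : List (List (String × String))) (out : List String) : Decidable (Spec_private_wire_field_leaks_py payloads out) := by unfold Spec_private_wire_field_leaks_py; infer_instance

-- ===== CLAIM (what is proved, stated in full; the proofs are below) =====
def Claim_equal_private_wire_field_leaks_py : Prop := ∀ (payloads : List (List (String × String))), Dom_private_wire_field_leaks_py payloads → Spec_private_wire_field_leaks_py payloads (private_wire_field_leaks_py payloads)

-- ===== LEMMAS AND PROOFS =====

-- membership in A's accumulated set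
theorem pv_mem_fold (payloads : List (List (String × String))) (acc : PySem.Set String)
    (f : String) :
    (f ∈ payloads.foldl
      (fun acc p =>
        PySem.Set.update acc (PySem.Set.inter pvPrivateWireFields (p.map (fun kv => kv.1))))
      acc) ↔
    f ∈ acc ∨ (f ∈ pvPrivateWireFields ∧ ∃ p ∈ payloads, ∃ kv ∈ p, kv.1 = f) := by
  induction payloads generalizing acc with
  | nil => simp
  | cons p ps ih =>
    simp only [List.foldl_cons, ih, PySem.Set.mem_update, PySem.Set.mem_inter, List.mem_map,
      List.mem_cons]
    constructor
    · rintro (((h | ⟨hf, kv, hkv, hval⟩) | ⟨hf, q, hq, hkv⟩))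
      · exact Or.inl h
      · exact Or.inr ⟨hf, p, Or.inl rfl, kv, hkv, hval⟩
      · exact Or.inr ⟨hf, q, Or.inr hq, hkv⟩
    · rintro (h | ⟨hf, q, (rfl | hq), kv, hkv, hval⟩)
      · exact Or.inl (Or.inl h)
      · exact Or.inl (Or.inr ⟨hf, kv, hkv, hval⟩)
      · exact Or.inr ⟨hf, q, hq, kv, hkv, hval⟩

-- A's accumulated set stays duplicate-free
theorem pv_nodup_fold (payloads : List (List (String × String))) (acc : PySem.Set String)
    (h : acc.Nodup) :
    (payloads.foldl
      (fun acc p =>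
        PySem.Set.update acc (PySem.Set.inter pvPrivateWireFields (p.map (fun kv => kv.1))))
      acc).Nodup := by
  induction payloads generalizing acc with
  | nil => exact h
  | cons p ps ih => exact ih _ (PySem.Set.nodup_update _ _ h)

-- sorted(PRIVATE_WIRE_FIELDS) is strictly increasing (sorted, and the field set has no duplicates)
theorem pv_sorted_fields_lt :
    (PySem.List.sorted pvPrivateWireFields (fun x => x) false).Pairwise (fun a b => a < b) := by
  have hnd : (PySem.List.sorted pvPrivateWireFields (fun x => x) false).Nodup :=
    (PySem.List.sorted_perm pvPrivateWireFields (fun x => x) false).nodup_iff.mpr (by decide)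
  have hle := PySem.List.sorted_pairwise pvPrivateWireFields (fun x => x)
  exact (hle.and hnd).imp (fun h => lt_of_le_of_ne h.1 h.2)

theorem private_wire_field_leaks_py_spec' (payloads : List (List (String × String))) :
    private_wire_field_leaks_py payloads = private_wire_field_leaks_py_alt payloads := by
  unfold private_wire_field_leaks_py private_wire_field_leaks_py_alt
  apply PySem.List.sorted_eq_of_perm_of_pairwise_lt
  · -- the filtered sorted field list is a permutation of A's set
    apply (List.perm_ext_iff_of_nodup ?_ ?_).mpr
    · intro f
      simp only [List.mem_filter, PySem.List.mem_sorted, pv_mem_fold, PySem.Set.empty,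
        List.not_mem_nil, false_or, List.any_eq_true, beq_iff_eq]
    · exact List.Nodup.filter _
        ((PySem.List.sorted_perm pvPrivateWireFields (fun x => x) false).nodup_iff.mpr (by decide))
    · exact pv_nodup_fold _ _ List.nodup_nil
  · -- it is strictly increasing
    exact List.Pairwise.filter _ pv_sorted_fields_lt

-- ===== VERDICT (by name: the statement is the Claim_ definition above) =====
theorem private_wire_field_leaks_py_spec : Claim_equal_private_wire_field_leaks_py := by
  intro payloads _
  exact private_wire_field_leaks_py_spec' payloads
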